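-- pv_equiv track=rewrite | github.com/CodeCiepol/AdventOfCode2024 | day1_2.py | calc_similarity_score_memo
-- ===== SOURCE A (Python) =====
-- def calc_similarity_score_memo(first_column, second_column):
--     similarity_score = 0
--     memo ={}
--     for number in first_column:
--         if number in memo:
--             nb_count = memo[number]
--         else:
--             nb_count = second_column.count(number)
--             memo[number] = nb_count
--         similarity_score += number * nb_count
--     return similarity_score
-- ===== SOURCE B (Python) =====
-- def calc_similarity_score_memo(first_column, second_column):
--     counts = {}
--     for n in second_column:
--         counts[n] = counts.get(n, 0) + 1
--     return sum(n * counts.get(n, 0) for n in first_column)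
-- ===== Notes on version B (the rewrite author's own statement) =====
-- stated objective: faster
-- what changed: Replaces the memoised per-value scans of second_column with one frequency table built in a single pass over second_column, then a single hash-lookup sum over first_column.
import Mathlib
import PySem

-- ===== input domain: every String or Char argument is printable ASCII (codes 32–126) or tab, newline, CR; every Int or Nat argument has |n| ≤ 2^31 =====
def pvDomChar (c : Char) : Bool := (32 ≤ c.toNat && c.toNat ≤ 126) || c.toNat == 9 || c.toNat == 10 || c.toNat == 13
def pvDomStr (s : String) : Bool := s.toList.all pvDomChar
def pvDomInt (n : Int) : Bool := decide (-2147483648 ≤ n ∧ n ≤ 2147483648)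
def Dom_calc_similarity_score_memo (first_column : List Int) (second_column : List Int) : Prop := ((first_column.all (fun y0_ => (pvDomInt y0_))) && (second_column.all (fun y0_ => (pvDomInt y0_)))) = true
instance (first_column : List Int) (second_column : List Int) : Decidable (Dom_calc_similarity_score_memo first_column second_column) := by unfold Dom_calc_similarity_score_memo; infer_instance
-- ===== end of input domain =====

-- B builds one frequency table of second_column and sums n * count in a single pass,
-- instead of A's memoised per-value scans of second_column (objective: faster).

-- ===== PORT A =====
def calc_similarity_score_memo (first_column : List Int) (second_column : List Int) : Int :=
  (first_column.foldl
    (fun (st : Int × PySem.Dict Int Int) number =>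
      match st.2.get? number with
      | some nb_count => (st.1 + number * nb_count, st.2)
      | none =>
        let nb_count : Int := (PySem.List.count second_column number : Int)
        (st.1 + number * nb_count, st.2.insert number nb_count))
    (0, PySem.Dict.empty)).1

-- ===== PORT B =====
def calc_similarity_score_memo_alt (first_column : List Int) (second_column : List Int) : Int :=
  let counts : PySem.Dict Int Int :=
    second_column.foldl (fun d n => d.insert n (d.getD n 0 + 1)) PySem.Dict.empty
  (first_column.map (fun n => n * counts.getD n 0)).sum

-- ===== PRECONDITION & SPEC =====
def Spec_calc_similarity_score_memo (first_column : List Int) (second_column : List Int) (out : Int) : Prop := out = calc_similarity_score_memo_alt first_column second_column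
instance (first_column : List Int) (second_column : List Int) (out : Int) : Decidable (Spec_calc_similarity_score_memo first_column second_column out) := by unfold Spec_calc_similarity_score_memo; infer_instance

-- ===== CLAIM (what is proved, stated in full; the proofs are below) =====
def Claim_equal_calc_similarity_score_memo : Prop := ∀ (first_column : List Int) (second_column : List Int), Dom_calc_similarity_score_memo first_column second_column → Spec_calc_similarity_score_memo first_column second_column (calc_similarity_score_memo first_column second_column)

-- ===== LEMMAS AND PROOFS =====

-- A's loop, from any accumulator and any memo whose entries already record counts in
-- second_column, produces acc + Σ n * count(second_column, n).
lemma calcA_inv (sc : List Int) (fc : List Int) :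
    ∀ (acc : Int) (memo : PySem.Dict Int Int),
    (∀ k v, memo.get? k = some v → v = (PySem.List.count sc k : Int)) →
    (fc.foldl
      (fun (st : Int × PySem.Dict Int Int) number =>
        match st.2.get? number with
        | some nb_count => (st.1 + number * nb_count, st.2)
        | none =>
          let nb_count : Int := (PySem.List.count sc number : Int)
          (st.1 + number * nb_count, st.2.insert number nb_count))
      (acc, memo)).1
    = acc + (fc.map (fun n => n * (PySem.List.count sc n : Int))).sum := by
  induction fc with
  | nil => intro acc memo _; simp
  | cons n fc ih =>
    intro acc memo h
    simp only [List.foldl_cons, List.map_cons, List.sum_cons]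
    cases hg : memo.get? n with
    | some c =>
      have hc := h n c hg
      simp only [hg]
      rw [ih (acc + n * c) memo h, hc]
      ring
    | none =>
      simp only [hg]
      rw [ih _ _ ?_]
      · ring
      · intro k v hkv
        rw [PySem.Dict.get?_insert] at hkv
        split at hkv
        · next heq => subst heq; exact (Option.some_injective _ hkv).symm
        · exact h k v hkv

lemma calcB_counts (sc : List Int) (n : Int) :
    (sc.foldl (fun d x => d.insert x (d.getD x 0 + 1)) PySem.Dict.empty).getD n 0
      = (PySem.List.count sc n : Int) := by
  rw [PySem.Dict.getD_foldl_insert_add_one]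
  simp [PySem.List.count]

-- ===== VERDICT (by name: the statement is the Claim_ definition above) =====
theorem calc_similarity_score_memo_spec : Claim_equal_calc_similarity_score_memo := by
  intro fc sc _
  unfold Spec_calc_similarity_score_memo calc_similarity_score_memo calc_similarity_score_memo_alt
  rw [calcA_inv sc fc 0 PySem.Dict.empty (by simp [PySem.Dict.get?_empty])]
  simp [calcB_counts]
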